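/- GENERATED by mk_final_copies.py from the proof of the farm's unit `decode_residue.4b` (farm:decode_residue.4b.1: Lemmas.lean) as the
   re-elaboration sweep compiled it — do not edit. -/
import Asan.CheckWalk
import Vorbis.Spec.Units.decode_residue_4b
open X86 X86.User Asan Vorbis Vorbis.Spec Vorbis.Spec.DecodeResidue

set_option maxRecDepth 4000
set_option maxHeartbeats 4000000

namespace Vorbis.Spec.decode_residue_4b

/-- Where the residue record `r` lies: inside the data space, off the stack region (R2 + `BlkOK` + `BlkFree`). -/
theorem r_where {u₀ : State} {g : G} {v : State} (hent : Entered u₀ g) (hc : Common u₀ g v) :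
    0x100000 ≤ g.r ∧ g.r + 32 ≤ 0xC00000 ∧ (g.r + 32 ≤ 0x700000 ∨ 0x800000 ≤ g.r) := by
  have hR : ResidueOK g.Blk v.mem g.f := hc.point.vorbis.residue
  have hB := hR.R2
  have hin := hc.point.env.ok.inside _ hB
  have hst := hent.pre.free.offStack _ hB
  have hlt := hc.rn_lt hent
  have h1 := hR.R1
  have e := hc.config_at
  unfold stb_vorbis.residue_config_at at e
  simp only [vblock, voff] at hin hst e
  omega




/-- The windows of the own stack frame that segment 4 stores to: everything below the steady stack pointer (return addresses,
the two pushed arguments, the callees' frames), the scratch slots `class_set` `[rbp−0xd8]`, `psz` `[rbp−0xb8]`, `z` `[rbp−0x98]`,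
and the two ints `c_inter` `[rbp−0x60]`, `p_inter` `[rbp−0x50]`. None of COMMON's constant slots is inside. -/
def stackWins (g : G) : List Span :=
  [⟨(g.e.reg .rsp).toNat - 848, (g.e.reg .rsp).toNat - 248⟩,
   ⟨(g.e.reg .rsp).toNat - 224, (g.e.reg .rsp).toNat - 220⟩,
   ⟨(g.e.reg .rsp).toNat - 192, (g.e.reg .rsp).toNat - 188⟩,
   ⟨(g.e.reg .rsp).toNat - 160, (g.e.reg .rsp).toNat - 156⟩,
   ⟨(g.e.reg .rsp).toNat - 104, (g.e.reg .rsp).toNat - 100⟩,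
   ⟨(g.e.reg .rsp).toNat - 88, (g.e.reg .rsp).toNat - 84⟩]

/-- A slot of the frame `[RA − 248, RA)` that meets none of the five small windows reads the same after stores inside
`stackWins`. -/
theorem slot_kept {g : G} {m m' : Mem} (hroom : 0x700000 + 848 ≤ (g.e.reg .rsp).toNat)
    (hs : Mem.SameExcept (stackWins g) m m') (k n : Nat) (hk : k ≤ 248) (hn : n ≤ k)
    (h1 : k ≤ 220 ∨ 224 ≤ k - n) (h2 : k ≤ 188 ∨ 192 ≤ k - n) (h3 : k ≤ 156 ∨ 160 ≤ k - n)
    (h4 : k ≤ 100 ∨ 104 ≤ k - n) (h5 : k ≤ 84 ∨ 88 ≤ k - n) :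
    m'.readLE (g.e.reg .rsp - UInt64.ofNat k) n = m.readLE (g.e.reg .rsp - UInt64.ofNat k) n := by
  have e : (g.e.reg .rsp - UInt64.ofNat k).toNat = (g.e.reg .rsp).toNat - k := by
    have hlt := (g.e.reg .rsp).toNat_lt
    rw [UInt64.toNat_sub_of_le]
    · rw [UInt64.toNat_ofNat']
      have : k % 2 ^ 64 = k := Nat.mod_eq_of_lt (by omega)
      omega
    · rw [UInt64.le_iff_toNat_le, UInt64.toNat_ofNat']
      have : k % 2 ^ 64 = k := Nat.mod_eq_of_lt (by omega)
      omega
  have hlt := (g.e.reg .rsp).toNat_lt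
  apply hs.readLE
  · rw [e]
    omega
  · intro w hw
    rw [e]
    simp only [stackWins, List.mem_cons, List.mem_nil_iff, or_false] at hw
    rcases hw with rfl | rfl | rfl | rfl | rfl | rfl <;> simp only [] <;> omega


/-- Every span of `stackWins` lies inside the stack frame `[RA − 848, RA)`. -/
theorem stackWins_in {g : G} (w : Span) (hw : w ∈ stackWins g) :
    (g.e.reg .rsp).toNat - 848 ≤ w.lo ∧ w.hi ≤ (g.e.reg .rsp).toNat ∧ w.lo ≤ w.hi := by
  simp only [stackWins, List.mem_cons, List.mem_nil_iff, or_false] at hw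
  rcases hw with rfl | rfl | rfl | rfl | rfl | rfl <;> simp only [] <;> omega

/-- **COMMON OVER STORES INTO THE OWN STACK FRAME** (`stackWins`): the frame slots read the same (`slot_kept`), nothing the
invariant reads is on the stack (`BlkFree.offStack`, AR1x), `Bits` and μ by `Reader.reader_of_window`. Also `PathA` (its three
slots) and FILL (the temp block, the record and `classdata` are off the stack). -/
theorem common_stack {u₀ : State} {g : G} {v v' : State} (hent : Entered u₀ g) (hc : Common u₀ g v)
    (hs : Mem.SameExcept (stackWins g) v.mem v'.mem) (hun : ShadowUntouched v.mem v'.mem)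
    (rbp : v'.reg .rbp = g.e.reg .rsp - 8) (rsp : v'.reg .rsp = g.e.reg .rsp - 248)
    (code : CodeOK u₀ v'.mem) (inv : abiInv v') :
    Common u₀ g v' ∧ (∀ pass, PathA g pass v → PathA g pass v') ∧
      (∀ j m, j < g.C → m ≤ g.PRD → Fill v.mem g.f g.r g.TB g.C g.PRD j m → Fill v'.mem g.f g.r g.TB g.C g.PRD j m) := by
  have hroom := hent.room.1
  have htop := hent.room.2
  have eRA : g.RA = (g.e.reg .rsp).toNat := rfl
  rw [eRA] at hroom htop
  have hok := hent.pre.env.ok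
  have hoff : ∀ B, g.Blk B → B.base + B.size ≤ 0x700000 ∨ 0x800000 ≤ B.base := hent.pre.free.offStack
  -- every allocated block is kept
  have hall : ∀ B, g.Blk B → B.Kept v.mem v'.mem := by
    intro B hB
    apply Block.Kept.of_sameExcept hs
    · intro w hw
      have h1 := stackWins_in w hw
      have h2 := hoff B hB
      omega
    · exact hok.no_wrap hB
  -- `*f` is off the stack
  have hob : g.Blk (objBlock g.f) := hent.vorbis.obj
  have hobst := hoff _ hob
  have hobin := hok.inside _ hob
  simp only [vblock, voff] at hobst hobin
  -- one coarse window for the reader's lemma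
  have hs1 : Mem.SameExcept [⟨(g.e.reg .rsp).toNat - 848, (g.e.reg .rsp).toNat⟩] v.mem v'.mem := by
    apply hs.mono
    intro w hw a h1 h2
    have h3 := stackWins_in w hw
    exact ⟨_, List.mem_singleton.mpr rfl, by simp only []; omega, by simp only []; omega⟩
  obtain ⟨hbits, hmu⟩ := Reader.reader_of_window hc.point.vorbis.bits hs1 (by omega)
  -- the footprint
  have hsame : Mem.SameExcept (g.spec.footprint g.e) g.e.mem v'.mem := by
    apply hc.same.step_same hs
    intro w hw a h1 h2
    have h3 := stackWins_in w hw
    refine ⟨_, List.mem_cons_self, ?_, ?_⟩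
    · show (g.e.reg .rsp).toNat - 848 ≤ a
      omega
    · show a < (g.e.reg .rsp).toNat
      omega
  -- the arena layer
  have hbusy : ADOBusy g.A' g.others' v'.mem g.f g.sz := by
    apply hc.point.busy.transfer
    apply ObjEq.of_sameExcept hs
    · intro w hw
      simp only [ADO.wins, List.mem_cons, List.mem_nil_iff, or_false] at hw
      rcases hw with rfl | rfl <;> simp only [] <;> omega
    · intro w hw s hsp
      have h3 := stackWins_in s hsp
      simp only [ADO.wins, List.mem_cons, List.mem_nil_iff, or_false] at hw
      rcases hw with rfl | rfl <;> simp only [] <;> omega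
  -- the temp block is off the stack
  have htb := hc.tblock
  have hrange := hc.point.busy.ok.tblock_range htb
  have h1x := hc.point.busy.ok.AR1x
  have har1 := hc.point.busy.ok.AR1
  have hr8 := le_r8 g.TB.size
  have hTBk : g.TB.Kept v.mem v'.mem := by
    apply Block.Kept.of_sameExcept hs
    · intro w hw
      have h3 := stackWins_in w hw
      omega
    · omega
  have htb' : TempRows v'.mem g.TB g.C g.PRD := by
    apply hc.tb.frame
    apply hTBk.mono
    · exact Nat.le_refl _
    · have hsz := hc.tb.size
      have h3 : g.C * (8 + 8 * g.PRD) = g.C * 8 + g.C * (8 * g.PRD) := Nat.mul_add _ _ _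
      simp only []
      omega
  have hk := fun k n hk hn h1 h2 h3 h4 h5 => slot_kept (g := g) hroom hs k n hk hn h1 h2 h3 h4 h5
  have hc' : Common u₀ g v' := by
    apply Common.of_frame hent rbp rsp code inv
    · exact (congrArg UInt64.ofNat (hk 8 8 (by omega) (by omega) (by omega) (by omega) (by omega) (by omega) (by omega))).trans hc.s_rbp
    · exact (congrArg UInt64.ofNat (hk 16 8 (by omega) (by omega) (by omega) (by omega) (by omega) (by omega) (by omega))).trans hc.s_r15
    · exact (congrArg UInt64.ofNat (hk 24 8 (by omega) (by omega) (by omega) (by omega) (by omega) (by omega) (by omega))).trans hc.s_r14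
    · exact (congrArg UInt64.ofNat (hk 32 8 (by omega) (by omega) (by omega) (by omega) (by omega) (by omega) (by omega))).trans hc.s_r13
    · exact (congrArg UInt64.ofNat (hk 40 8 (by omega) (by omega) (by omega) (by omega) (by omega) (by omega) (by omega))).trans hc.s_r12
    · exact (congrArg UInt64.ofNat (hk 48 8 (by omega) (by omega) (by omega) (by omega) (by omega) (by omega) (by omega))).trans hc.s_rbx
    · exact (congrArg UInt64.ofNat (hk 184 8 (by omega) (by omega) (by omega) (by omega) (by omega) (by omega) (by omega))).trans hc.fr_f
    · exact (congrArg UInt64.ofNat (hk 216 8 (by omega) (by omega) (by omega) (by omega) (by omega) (by omega) (by omega))).trans hc.fr_rb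
    · exact (hk 156 4 (by omega) (by omega) (by omega) (by omega) (by omega) (by omega) (by omega)).trans hc.fr_ch
    · exact (hk 196 4 (by omega) (by omega) (by omega) (by omega) (by omega) (by omega) (by omega)).trans hc.fr_prd
    · exact (hk 200 4 (by omega) (by omega) (by omega) (by omega) (by omega) (by omega) (by omega)).trans hc.fr_w
    · exact (hk 232 4 (by omega) (by omega) (by omega) (by omega) (by omega) (by omega) (by omega)).trans hc.fr_rtype
    · exact (hk 176 8 (by omega) (by omega) (by omega) (by omega) (by omega) (by omega) (by omega)).trans hc.fr_pcd
    · exact (hk 240 8 (by omega) (by omega) (by omega) (by omega) (by omega) (by omega) (by omega)).trans hc.fr_si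
    · exact hsame
    · exact hc.shadow.untouched hun
    · exact hbits
    · exact hbusy
    · exact htb'
    · rw [hmu]
      exact hc.mu_le
  refine ⟨hc', ?_, ?_⟩
  · intro pass hp
    refine ⟨hp.rtype2, hp.ch_ge, hp.pass_le, ?_, ?_, ?_⟩
    · exact (hk 168 4 (by omega) (by omega) (by omega) (by omega) (by omega) (by omega) (by omega)).trans hp.sl_pass
    · exact (hk 228 4 (by omega) (by omega) (by omega) (by omega) (by omega) (by omega) (by omega)).trans hp.sl_tap
    · exact (hk 208 4 (by omega) (by omega) (by omega) (by omega) (by omega) (by omega) (by omega)).trans hp.sl_n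
  · intro j m hj hm hfill
    have hres := hc.resAt hent
    have hrd : ResidueReads v.mem g.f v'.mem g.f g.r :=
      ⟨hc'.reads.begin.trans hc.reads.begin.symm, hc'.reads.end_.trans hc.reads.end_.symm,
       hc'.reads.part_size.trans hc.reads.part_size.symm, hc'.reads.classifications.trans hc.reads.classifications.symm,
       hc'.reads.classbook.trans hc.reads.classbook.symm, hc'.reads.classdata.trans hc.reads.classdata.symm,
       hc'.reads.residue_books.trans hc.reads.residue_books.symm, hc'.reads.codebook_count.trans hc.reads.codebook_count.symm,
       hc'.reads.cbk.trans hc.reads.cbk.symm, hc'.reads.E.trans hc.reads.E.symm, hc'.reads.W.trans hc.reads.W.symm⟩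
    exact hfill.frame hj hm hc.tb.size hTBk hrd (hall _ hres.R8a)




/-- `n ≤ 4096` (P1 + HD3) and `part_read ≤ 8192`. -/
theorem n_prd_le {u₀ : State} {g : G} (hent : Entered u₀ g) : g.n ≤ 4096 ∧ g.PRD ≤ 8192 := by
  have h3 := Vorbis.VorbisOK.hd3v (groups_laws g.len) hent.vorbis
  have hn := hent.args.n_le
  have hp : g.PRD ≤ 2 * g.n := Residue.partReadDec_le _ _ _ _
  have hb : bsize g.e.mem g.f 1 = (stb_vorbis.blocksize_1 g.e.mem g.f).toNat := rfl
  have hhi := h3.hi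
  omega

/-- `&c_inter` as the machine spells it. -/
theorem addr_ci {u₀ : State} {g : G} (hent : Entered u₀ g) : addr g.ci = g.e.reg .rsp - 104 := by
  have h := hent.room.1
  unfold G.ci
  rw [← addr_sub_lit _ 104 (by omega)]
  unfold G.RA
  rw [addr_toNat]

/-- `&p_inter` as the machine spells it. -/
theorem addr_pi {u₀ : State} {g : G} (hent : Entered u₀ g) : addr g.pi = g.e.reg .rsp - 88 := by
  have h := hent.room.1
  unfold G.pi
  rw [← addr_sub_lit _ 88 (by omega)]
  unfold G.RA
  rw [addr_toNat]

/-- A signed 32-bit value is below `2^31` as a natural number. -/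
theorem sint32_toNat_lt (n : Nat) (h : n < 2 ^ 32) : (sint32 n).toNat < 2 ^ 31 := by
  have := sint32_cases n
  omega

/-- `classwords < 2^31`: it is the non-negative part of an `int`. -/
theorem w_lt (g : G) : g.W < 2 ^ 31 :=
  sint32_toNat_lt _ (Mem.u32_lt _ _)

/-- Where the temp block lies: inside the data space, off the stack region (`ADOBusy.tblock`, `ArenaOK.tblock_range`, AR1, AR1x). -/
theorem tb_where {u₀ : State} {g : G} {v : State} (hc : Common u₀ g v) :
    0x100000 ≤ g.TB.base ∧ g.TB.base + g.TB.size ≤ 0xC00000 ∧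
      (g.TB.base + g.TB.size ≤ 0x700000 ∨ 0x800000 ≤ g.TB.base) := by
  have htb := hc.tblock
  have hrange := hc.point.busy.ok.tblock_range htb
  have h1x := hc.point.busy.ok.AR1x
  have har1 := hc.point.busy.ok.AR1
  have hr8 := le_r8 g.TB.size
  omega

/-- **`Live(&c_inter, 4)` and `Live(&p_inter, 4)`** (the fields `cpSite`, `ppSite` of `DeintPre` for the call at 0x10f18e): the two
ints are the objects of decode_residue's own protected frame, the first of `g.frames'`. -/
theorem ints_site {u₀ : State} {g : G} (hent : Entered u₀ g) : Site g.Live' g.ci 4 ∧ Site g.Live' g.pi 4 := by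
  have hroom := hent.room.1
  have hci : (⟨g.RA - 152 + 48, 4, .stack⟩ : Obj) ∈ stackObjs g.frames' ++ g.others' := by
    apply List.mem_append_left
    unfold G.frames'
    rw [stackObjs_cons]
    apply List.mem_append_left
    unfold FrameLayout.objsAt Vorbis.Frames.decode_residue
    simp only [List.map_cons, List.map_nil]
    exact List.mem_cons_self
  have hpi : (⟨g.RA - 152 + 64, 4, .stack⟩ : Obj) ∈ stackObjs g.frames' ++ g.others' := by
    apply List.mem_append_left
    unfold G.frames'
    rw [stackObjs_cons]
    apply List.mem_append_left
    unfold FrameLayout.objsAt Vorbis.Frames.decode_residue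
    simp only [List.map_cons, List.map_nil]
    exact List.mem_cons_of_mem _ List.mem_cons_self
  constructor
  · apply Site.of_inLive ?_ (by omega)
    intro k hk
    refine ⟨_, hci, ?_⟩
    unfold Obj.Bytes G.ci
    simp only []
    omega
  · apply Site.of_inLive ?_ (by omega)
    intro k hk
    refine ⟨_, hpi, ?_⟩
    unfold Obj.Bytes G.pi
    simp only []
    omega

/-- **`Live(outputs, 8·ch)`** (the field `table` of `DeintPre`): the caller's pointer array (P2), in the live set inside the function. -/
theorem table_site {u₀ : State} {g : G} (hent : Entered u₀ g) (hch : 1 ≤ g.ch) : Site g.Live' g.rb (8 * g.ch) := by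
  have h := (LiveBytes.of_liveIn hent.args.rb_live).site g.rb (8 * g.ch) (Nat.le_refl _) (Nat.le_refl _) (by omega)
  exact h.mono g.live_mono

/-- **`∀ k < ch: outputs[k] = NULL ∨ Block(outputs[k], ≥ 4·len)`** (the field `outs` of `DeintPre`, `len = n`), in any memory in
which the caller's pointer array reads as at the entry (`Common.rb_same`): P2 (`Args.null`, `Args.buf`) + M6 (`SampleBuf.blk`). -/
theorem outs_ok {u₀ : State} {g : G} (hent : Entered u₀ g) {m : Mem}
    (hrb : ∀ j, j < g.ch → m.ptr (g.rb + 8 * j) = g.e.mem.ptr (g.rb + 8 * j)) :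
    ∀ k, k < g.ch → m.ptr (g.rb + 8 * k) = 0 ∨ ∃ sz, 4 * g.n ≤ sz ∧ g.Blk ⟨m.ptr (g.rb + 8 * k), sz⟩ := by
  intro k hk
  rw [hrb k hk]
  by_cases hd : DND g.e.mem g.dnd k
  · exact Or.inl (hent.args.null k hk hd)
  · obtain ⟨c, hc, hp, _⟩ := hent.args.buf k hk hd
    refine Or.inr ⟨4 * bsize g.e.mem g.f 1, ?_, ?_⟩
    · have := hent.args.n_le
      omega
    · rw [hp]
      exact SampleBuf.blk hent.vorbis.config (SampleBuf.chan c hc)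

/-- **`DeintApart`** (the field `apart` of `DeintPre` for the call at 0x10f18e, book number `i`, `len = n`) in a memory `m` in which
CONFIG and SEP hold and every non-NULL `residue_buffers[k]` is a channel buffer of `4·b1 ≥ 4·n` bytes: the float windows are
parts of sample buffers (SEP: off `*f`, the codebooks block, the `sorted_values` block), everything else is stack against
allocated blocks (`BlkFree.offStack`). -/
theorem apart_ok {u₀ : State} {g : G} (hent : Entered u₀ g) {m : Mem} (hcfg : ConfigOK g.Blk m g.f)
    (hsep : Separated g.Blk m g.f)
    (hwin : ∀ k, k < g.ch → m.ptr (g.rb + 8 * k) ≠ 0 →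
      ∃ c : Nat, (c : Int) < stb_vorbis.channels m g.f ∧ m.ptr (g.rb + 8 * k) = stb_vorbis.channel_buffers m g.f c)
    (hn : g.n ≤ bsize m g.f 1) (i : Nat) (hi : (i : Int) < stb_vorbis.codebook_count m g.f) :
    DeintApart m g.f (stb_vorbis.codebooks_at m g.f i) g.rb g.ch g.ci g.pi g.n := by
  have hroom := hent.room.1
  have htop := hent.room.2
  have hoff : ∀ B, g.Blk B → B.base + B.size ≤ 0x700000 ∨ 0x800000 ≤ B.base := hent.pre.free.offStack
  have hob : g.Blk (objBlock g.f) := hent.vorbis.obj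
  have hobst := hoff _ hob
  simp only [vblock, voff] at hobst
  have hrbst := hent.args.rb_stack
  -- a non-NULL output window is the front of a channel buffer
  have hbuf : ∀ k, k < g.ch → m.ptr (g.rb + 8 * k) ≠ 0 → ∃ C, SampleBuf g.Blk m g.f C ∧
      C.base = m.ptr (g.rb + 8 * k) ∧ 4 * g.n ≤ C.size := by
    intro k hk hne
    obtain ⟨c, hc, hp⟩ := hwin k hk hne
    exact ⟨_, SampleBuf.chan c hc, hp.symm, by simp only []; omega⟩
  refine ⟨?_, ?_, ?_, ?_, ?_, ?_, ?_, ?_, ?_, hent.deint_tableObj⟩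
  · show (Block.mk g.ci 4).disjoint (Block.mk g.pi 4)
    unfold G.ci G.pi
    simp only [vblock]
    omega
  · unfold G.ci G.RA at *
    simp only [vblock, voff]
    omega
  · unfold G.pi G.RA at *
    simp only [vblock, voff]
    omega
  · intro k hk hne
    obtain ⟨C, hC, hb, hsz⟩ := hbuf k hk hne
    have hd := hsep.bufobj C hC
    unfold deint.window
    simp only [vblock, voff] at hd ⊢
    omega
  · intro k hk hne
    obtain ⟨C, hC, hb, hsz⟩ := hbuf k hk hne
    have hd := hsep.buf _ ConfigOK.Reads.codebooks C hC
    have hi' : i < (stb_vorbis.codebook_count m g.f).toNat := by omega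
    unfold deint.window stb_vorbis.codebooks_at
    simp only [vblock, voff] at hd ⊢
    omega
  · intro k hk hne hse
    obtain ⟨C, hC, hb, hsz⟩ := hbuf k hk hne
    have hd := hsep.buf _ (ConfigOK.Reads.sorted_values i hi hse) C hC
    unfold deint.window
    simp only [vblock] at hd ⊢
    omega
  · intro k hk hne
    obtain ⟨C, hC, hb, hsz⟩ := hbuf k hk hne
    have hst := hoff C (SampleBuf.blk hcfg hC)
    unfold deint.window G.RA at *
    simp only [vblock]
    omega
  · intro k hk hne
    obtain ⟨C, hC, hb, hsz⟩ := hbuf k hk hne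
    have hst := hoff C (SampleBuf.blk hcfg hC)
    unfold deint.window G.ci G.RA at *
    simp only [vblock]
    omega
  · intro k hk hne
    obtain ⟨C, hC, hb, hsz⟩ := hbuf k hk hne
    have hst := hoff C (SampleBuf.blk hcfg hC)
    unfold deint.window G.pi G.RA at *
    simp only [vblock]
    omega

/-- `RA − k` as the machine spells it. -/
theorem rsp_sub {u₀ : State} {g : G} (hent : Entered u₀ g) (k : Nat) (hk : k ≤ 848) :
    (g.e.reg .rsp - UInt64.ofNat k).toNat = g.RA - k := by
  have hroom := hent.room.1
  have hlt := (g.e.reg .rsp).toNat_lt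
  unfold G.RA at *
  rw [UInt64.toNat_sub_of_le]
  · rw [UInt64.toNat_ofNat']
    have : k % 2 ^ 64 = k := Nat.mod_eq_of_lt (by omega)
    omega
  · rw [UInt64.le_iff_toNat_le, UInt64.toNat_ofNat']
    have : k % 2 ^ 64 = k := Nat.mod_eq_of_lt (by omega)
    omega

/-- **INTERFACE S7 → S3: `DeintPre` at the call 0x10f18e** (the precondition of codebook_decode_deinterleave_repeat), for a state
`s` that differs from a COMMON state `v` by stores into the own frame only (`stackWins`: the spills, the two pushed arguments, the
return address) and has the arguments in place: rdi = f, rsi = `codebooks + 2120·b` with `b < codebook_count`, rdx =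
residue_buffers, ecx = ch, r8 = &c_inter, r9 = &p_inter, rsp = RA − 272, `[rsp+8] = n`, `[rsp+16] = part_size`; CI on the two
ints. Every field follows from `Entered`, `Common` and `InterAt`. -/
theorem deint_pre {u₀ : State} {g : G} {v s : State} (hent : Entered u₀ g) (hc : Common u₀ g v) (hch2 : g.ch = 2)
    (hs : Mem.SameExcept (stackWins g) v.mem s.mem) (hun : ShadowUntouched v.mem s.mem) (code : CodeOK u₀ s.mem)
    (hinter : InterAt s.mem g.ci g.pi g.ch g.n)
    (rsp : s.reg .rsp = g.e.reg .rsp - 272) (rdi : s.reg .rdi = g.e.reg .rdi) (rdx : s.reg .rdx = g.e.reg .rsi)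
    (rcx : (s.reg .rcx).toNat % 2 ^ 32 = g.ch) (r8 : s.reg .r8 = g.e.reg .rsp - 104) (r9 : s.reg .r9 = g.e.reg .rsp - 88)
    (b : Nat) (hb : (b : Int) < stb_vorbis.codebook_count s.mem g.f)
    (rsi : (s.reg .rsi).toNat = stb_vorbis.codebooks_at s.mem g.f b)
    (hlen : s.mem.u32 (g.RA - 264) = g.n) (htot : s.mem.u32 (g.RA - 256) = Residue.part_size g.e.mem g.r) :
    DeintPre g.others' g.frames' g.Blk g.len s := by
  have hroom := hent.room.1
  have htop := hent.room.2
  have halign : g.RA % 8 = 0 := hent.entry.align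
  obtain ⟨hn4096, _⟩ := n_prd_le hent
  -- COMMON for the memory of `s` (the registers of `v`)
  obtain ⟨hc', _, _⟩ := common_stack (v' := { v with mem := s.mem }) hent hc hs hun hc.rbp hc.rsp code hc.inv
  have hv : Real.VorbisOK g.len g.Blk s.mem g.f := hc'.point.vorbis
  have hcfg := hv.config
  have hsep : Separated g.Blk s.mem g.f := hc'.sep
  have hsame : Mem.SameExcept (g.spec.footprint g.e) g.e.mem s.mem := hc'.same
  have hshadow : ShadowInv g.others' g.frames' (g.RA - 248) s.mem := hc'.shadow
  have hobj : DecodeSame g.f g.e.mem s.mem := hc'.obj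
  have hrbs : ∀ j, j < g.ch → s.mem.ptr (g.rb + 8 * j) = g.e.mem.ptr (g.rb + 8 * j) := hc'.rb_same
  -- the registers as numbers
  have ersp : (s.reg .rsp).toNat = g.RA - 272 := by
    rw [rsp]
    exact rsp_sub hent 272 (by omega)
  have er8 : (s.reg .r8).toNat = g.ci := by
    rw [r8]
    exact rsp_sub hent 104 (by omega)
  have er9 : (s.reg .r9).toNat = g.pi := by
    rw [r9]
    exact rsp_sub hent 88 (by omega)
  have erdi : (s.reg .rdi).toNat = g.f := by
    rw [rdi]
    rfl
  have erdx : (s.reg .rdx).toNat = g.rb := by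
    rw [rdx]
    rfl
  have ercx : argU32 (s.reg .rcx) = g.ch := rcx
  have e8 : (s.reg .rsp).toNat + 8 = g.RA - 264 := by omega
  have e16 : (s.reg .rsp).toNat + 16 = g.RA - 256 := by omega
  have e24 : (s.reg .rsp).toNat + 24 = g.RA - 248 := by omega
  have hsh : ShadowPre g.others' g.frames' s := by
    refine ⟨?_, hent.offText'⟩
    rw [e8]
    exact hshadow.lower (by omega) (by omega) (by omega)
  -- the channel buffers read as at the entry
  have hchan : stb_vorbis.channels s.mem g.f = stb_vorbis.channels g.e.mem g.f := by
    simp only [vacc, voff]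
    exact hobj.i32 4 (by decide)
  have hC16 := hent.vorbis.config.header.HD1.2
  have hcb : ∀ c : Nat, (c : Int) < stb_vorbis.channels g.e.mem g.f →
      stb_vorbis.channel_buffers s.mem g.f c = stb_vorbis.channel_buffers g.e.mem g.f c := by
    intro c hcc
    have hw : InWins decodeWins (872 + 8 * c) 8 := by
      apply InWins.of_mem (144, 1000) (by decide)
      · show 144 ≤ 872 + 8 * c
        omega
      · show 872 + 8 * c + 8 ≤ 1000
        omega
    have e := hobj.ptr (872 + 8 * c) hw
    have ea : g.f + (872 + 8 * c) = g.f + 872 + 8 * c := by omega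
    rw [ea] at e
    simp only [vacc, voff]
    exact e
  have hb1 : bsize s.mem g.f 1 = bsize g.e.mem g.f 1 := by
    show (stb_vorbis.blocksize_1 s.mem g.f).toNat = (stb_vorbis.blocksize_1 g.e.mem g.f).toNat
    congr 1
    simp only [vacc, voff]
    exact hobj.i32 156 (by decide)
  refine ⟨?_, ?_, ?_, ?_, ?_, ?_, ?_, ?_, ?_, ?_, ?_, ?_⟩
  · -- BookPre
    refine ⟨⟨hsh, ?_, ?_⟩, hent.pre.env.ok, ?_, ?_, ?_⟩
    · rw [erdi]
      exact hent.reader'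
    · rw [erdi]
      exact hv.bits
    · rw [rsi]
      refine ⟨_, hcfg.cb0.F2, ?_⟩
      have hcnt := hcfg.cb0.F1
      have hi' : b < (stb_vorbis.codebook_count s.mem g.f).toNat := by omega
      constructor
      · show stb_vorbis.codebooks s.mem g.f ≤ stb_vorbis.codebooks_at s.mem g.f b
        unfold stb_vorbis.codebooks_at
        omega
      · show stb_vorbis.codebooks_at s.mem g.f b + Off.sizeof.Codebook ≤
          stb_vorbis.codebooks s.mem g.f + Off.sizeof.Codebook * (stb_vorbis.codebook_count s.mem g.f).toNat
        unfold stb_vorbis.codebooks_at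
        simp only [voff]
        omega
    · rw [rsi]
      exact hcfg.books b hb
    · rw [erdi, rsi]
      exact hent.bookApart hsame b hb
  · -- the two argument slots are clean stack
    rw [e24]
    exact hshadow
  · rw [ercx]
    omega
  · rw [ercx]
    omega
  · rw [e8, hlen]
    exact hn4096
  · rw [e16]
    show 1 ≤ sint32 (s.mem.u32 (g.RA - 256))
    rw [htot]
    have h5 := (hent.vorbis.residue.record g.rn hent.args.rn_lt).R5
    have := sint32_cases (Residue.part_size g.e.mem g.r)
    have e : stb_vorbis.residue_config_at g.e.mem g.f g.rn = g.r := rfl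
    rw [e] at h5
    omega
  · rw [er8]
    exact (ints_site hent).1
  · rw [er9]
    exact (ints_site hent).2
  · rw [er8, er9, ercx, e8, hlen]
    exact hinter
  · rw [erdx, ercx]
    exact table_site hent (by omega)
  · rw [erdx, ercx, e8, hlen]
    exact outs_ok hent hrbs
  · rw [erdi, rsi, erdx, ercx, er8, er9, e8, hlen]
    apply apart_ok hent hcfg hsep ?_ ?_ b hb
    · intro k hk hne
      rw [hrbs k hk] at hne ⊢
      by_cases hd : DND g.e.mem g.dnd k
      · exact absurd (hent.args.null k hk hd) hne
      · obtain ⟨c, hcc, hp, _⟩ := hent.args.buf k hk hd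
        refine ⟨c, ?_, ?_⟩
        · rw [hchan]
          exact hcc
        · rw [hp, hcb c hcc]
    · rw [hb1]
      have := hent.args.n_le
      omega


/-- `movsx r64, r16` of a non-negative 16-bit value is its zero extension. -/
theorem sext16_bv (x : BitVec 16) (h : x < 32768#16) : BitVec.signExtend 64 x = BitVec.setWidth 64 x := by
  bv_decide

/-- `movsx rsi, bx` with `rbx = b < 32768`: the number `b`. -/
theorem sext16_part (b : Nat) (hb : b < 32768) :
    Word.ofBV (BitVec.signExtend 64 (Word.part Width.w16 (UInt64.ofNat b))) = addr b := by
  have e : (Word.part Width.w16 (UInt64.ofNat b)).toNat = b := by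
    unfold Word.part
    simp only [Width.bits, BitVec.toNat_setWidth, UInt64.toNat_toBitVec, UInt64.toNat_ofNat']
    omega
  have hlt : Word.part Width.w16 (UInt64.ofNat b) < 32768#16 := by
    rw [BitVec.lt_def, e]
    exact hb
  rw [sext16_bv _ hlt]
  apply eq_addr
  unfold Word.ofBV
  simp only [UInt64.toNat_ofBitVec, BitVec.toNat_setWidth, e]
  omega

/-- A pushed 32-bit argument (`mov eax, [slot] ; push rax`), read back as the dword the callee reads. -/
theorem arg_slot {u₀ : State} {g : G} (hent : Entered u₀ g) {m : Mem} (k : Nat) {x : Nat} (hk : k ≤ 848) (hx : x < 2 ^ 32)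
    (h8 : m.readLE (g.e.reg .rsp - UInt64.ofNat k) 8 = (BitVec.setWidth 64 (BitVec.ofNat 32 x)).toNat) :
    m.u32 (g.RA - k) = x := by
  have hroom := hent.room.1
  have htop := hent.room.2
  have ea : addr (g.RA - k) = g.e.reg .rsp - UInt64.ofNat k := by
    apply UInt64.toNat_inj.mp
    rw [rsp_sub hent k hk, toNat_addr _ (by omega)]
  unfold Mem.u32
  rw [ea, X86.User.Mem.readLE_prefix _ _ 4 4, h8]
  simp only [BitVec.toNat_setWidth, BitVec.toNat_ofNat]
  omega



/-- **Where a window of the call's footprint lies** (the callee's stack window `⟨lo, hi⟩` below its entry stack pointer and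
`deint.wins s`): a window of the bit reader inside `*f`, `c_inter`, `p_inter`, or a `CarryWin g 252` (the stack below
`RA − 252`: the callee's frame, the argument slot `total_decode`; or a part of a channel buffer). -/
theorem deint_win_where {u₀ : State} {g : G} (hent : Entered u₀ g) {s : State}
    (hsame : Mem.SameExcept (g.spec.footprint g.e) g.e.mem s.mem)
    (hrsp : (s.reg .rsp).toNat = g.RA - 272) (hrdi : (s.reg .rdi).toNat = g.f) (hrdx : (s.reg .rdx).toNat = g.rb)
    (hrcx : argU32 (s.reg .rcx) = g.ch) (hr8 : (s.reg .r8).toNat = g.ci) (hr9 : (s.reg .r9).toNat = g.pi)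
    (hlen : s.mem.u32 (g.RA - 264) = g.n) {lo hi : Nat} (hlo : g.RA - 848 ≤ lo) (hhi : hi ≤ g.RA - 272)
    (w : Span) (hw : w ∈ (⟨lo, hi⟩ : Span) :: deint.wins s) :
    w ∈ bookWins g.f ∨ CarryWin g 252 w ∨ w = ⟨g.ci, g.ci + 4⟩ ∨ w = ⟨g.pi, g.pi + 4⟩ := by
  have hroom := hent.room.1
  have e8 : (s.reg .rsp).toNat + 8 = g.RA - 264 := by omega
  rcases List.mem_cons.mp hw with rfl | hw1
  · -- the callee's stack frame
    right
    left
    left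
    simp only []
    omega
  · rcases deint.wins_cases hw1 with hb | h8 | h9 | hslot | ⟨k, hk, hnz, hwin⟩
    · left
      rw [hrdi] at hb
      exact hb
    · right
      right
      left
      rw [h8, hr8]
    · right
      right
      right
      rw [h9, hr9]
    · -- the argument slot `total_decode`: `[RA − 256, RA − 252)`
      right
      left
      left
      rw [hslot, hrsp]
      simp only []
      omega
    · -- a non-NULL output window: the front of a channel buffer
      right
      left
      right
      rw [hrcx] at hk
      rw [hrdx] at hnz hwin
      rw [e8, hlen] at hwin
      obtain ⟨c, hc, hptr⟩ := hent.deint_out_chan hsame hk hnz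
      have hn := hent.args.n_le
      refine ⟨c, hc, ?_, ?_⟩
      · rw [hwin, hptr]
        exact Nat.le_refl _
      · rw [hwin, hptr]
        simp only []
        omega

/-- The temp block does not meet `*f`: the one is inside the free part of the arena, the other is an allocated block. -/
theorem tb_off_obj {u₀ : State} {g : G} {v : State} (hent : Entered u₀ g) (hc : Common u₀ g v) :
    g.TB.base + g.TB.size ≤ g.f ∨ g.f + 1808 ≤ g.TB.base := by
  have hob : g.Blk (objBlock g.f) := hent.vorbis.obj
  have hgap := hent.pre.free.offGap _ hob
  have hbusy : ADOBusy g.A' g.others' v.mem g.f g.sz := hc.point.busy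
  have htr := hbusy.ok.tblock_range hc.tblock
  have h2 := hbusy.ok.AR2
  have hl8 := le_r8 g.TB.size
  unfold G.A' at htr h2
  simp only [varena] at htr h2
  simp only [vblock, voff] at hgap
  omega

/-- **COMMON OVER THE CALL of codebook_decode_deinterleave_repeat** (0x10f18e). `v`: a COMMON state whose memory is that of `s`, the
state at the callee's first instruction; `m`: the memory after the return (`hcall`: the walker's `w_same`, the callee's stack
window spelled `⟨lo, hi⟩`). The footprint by `Entered.same_through_deint`; the shadow by SH8 (`hun`); `Bits` and μ from the callee's
`ReaderPost`; the arena fields (`ADO.wins`) are not in the footprint; the temp block, the record's `classdata` table and every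
slot of the frame `[RA − 248, RA)` but the two ints miss every window of the callee (`deint_win_where`). Also `PathA` (its three
slots), FILL, and the slot `class_set`. -/
theorem common_deint {u₀ : State} {g : G} {v s : State} {m : Mem} (hent : Entered u₀ g) (hc : Common u₀ g v)
    (hmem : s.mem = v.mem)
    (hrsp : (s.reg .rsp).toNat = g.RA - 272) (hrdi : (s.reg .rdi).toNat = g.f) (hrdx : (s.reg .rdx).toNat = g.rb)
    (hrcx : argU32 (s.reg .rcx) = g.ch) (hr8 : (s.reg .r8).toNat = g.ci) (hr9 : (s.reg .r9).toNat = g.pi)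
    (hlen : s.mem.u32 (g.RA - 264) = g.n) {lo hi : Nat} (hlo : g.RA - 848 ≤ lo) (hle : lo ≤ hi) (hhi : hi ≤ g.RA - 272)
    (hcall : Mem.SameExcept (⟨lo, hi⟩ :: deint.wins s) s.mem m)
    (hun : ShadowUntouched s.mem m) (hrp : ReaderPost g.Blk g.len s.mem m g.f) (code : CodeOK u₀ m) :
    Common u₀ g { v with mem := m } ∧ (∀ pass, PathA g pass v → PathA g pass { v with mem := m }) ∧
      (∀ j k, j < g.C → k ≤ g.PRD → Fill v.mem g.f g.r g.TB g.C g.PRD j k → Fill m g.f g.r g.TB g.C g.PRD j k) ∧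
      m.readLE (g.e.reg .rsp - 224) 4 = v.mem.readLE (g.e.reg .rsp - 224) 4 := by
  have hroom := hent.room.1
  have htop := hent.room.2
  have eRA : g.RA = (g.e.reg .rsp).toNat := rfl
  have hok := hent.pre.env.ok
  have hob : g.Blk (objBlock g.f) := hent.vorbis.obj
  have hobst := hent.pre.free.offStack _ hob
  have hobin := hok.inside _ hob
  simp only [vblock, voff] at hobst hobin
  have hsame0 : Mem.SameExcept (g.spec.footprint g.e) g.e.mem s.mem := by
    rw [hmem]
    exact hc.same
  have hwhere := fun w hw => deint_win_where hent hsame0 hrsp hrdi hrdx hrcx hr8 hr9 hlen hlo hhi w hw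
  -- the footprint after the call
  have hsame : Mem.SameExcept (g.spec.footprint g.e) g.e.mem m :=
    hent.same_through_deint hsame0 hrsp hrdi hrdx hrcx hr8 hr9 hlen hlo hle (by omega) hcall
  -- a slot of the frame `[RA − 248, RA)` off the two ints reads the same
  have hk : ∀ k n : Nat, n ≤ k → k ≤ 248 → (k ≤ 100 ∨ 104 ≤ k - n) → (k ≤ 84 ∨ 88 ≤ k - n) →
      m.readLE (g.e.reg .rsp - UInt64.ofNat k) n = v.mem.readLE (g.e.reg .rsp - UInt64.ofNat k) n := by
    intro k n hn hk248 h1 h2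
    have e := rsp_sub hent k (by omega)
    rw [← hmem]
    apply hcall.readLE
    · rw [e]
      omega
    · intro w hw
      rw [e]
      rcases hwhere w hw with hb | hcw | rfl | rfl
      · unfold bookWins at hb
        simp only [List.mem_cons, List.not_mem_nil, or_false] at hb
        rcases hb with rfl | rfl | rfl | rfl | rfl <;> simp only [] <;> omega
      · obtain ⟨_, _, _, h4⟩ := hcw.carry_apart hent hc (by decide : 252 ≤ 848)
        omega
      · unfold G.ci
        simp only []
        omega
      · unfold G.pi
        simp only []
        omega
  -- the temp block is kept
  obtain ⟨htw1, htw2, htw3⟩ := tb_where hc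
  have htbobj := tb_off_obj hent hc
  have hTBk : g.TB.Kept s.mem m := by
    apply Block.Kept.of_sameExcept hcall
    · intro w hw
      rcases hwhere w hw with hb | hcw | rfl | rfl
      · unfold bookWins at hb
        simp only [List.mem_cons, List.not_mem_nil, or_false] at hb
        rcases hb with rfl | rfl | rfl | rfl | rfl <;> simp only [] <;> omega
      · obtain ⟨_, _, h3, _⟩ := hcw.carry_apart hent hc (by decide : 252 ≤ 848)
        omega
      · unfold G.ci
        simp only []
        omega
      · unfold G.pi
        simp only []
        omega
    · omega
  rw [hmem] at hTBk
  have htb' : TempRows m g.TB g.C g.PRD := by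
    apply hc.tb.frame
    apply hTBk.mono
    · exact Nat.le_refl _
    · have hsz := hc.tb.size
      have h3 : g.C * (8 + 8 * g.PRD) = g.C * 8 + g.C * (8 * g.PRD) := Nat.mul_add _ _ _
      simp only []
      omega
  -- the arena fields
  have hbusy : ADOBusy g.A' g.others' m g.f g.sz := by
    have hb0 : ADOBusy g.A' g.others' s.mem g.f g.sz := by
      rw [hmem]
      exact hc.point.busy
    apply hb0.transfer
    apply ObjEq.of_sameExcept hcall
    · intro w hw
      simp only [ADO.wins, List.mem_cons, List.mem_nil_iff, or_false] at hw
      rcases hw with rfl | rfl <;> simp only [] <;> omega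
    · intro w hw sp hsp
      have hw' : w = (12, 16) ∨ w = (112, 136) := by
        simp only [ADO.wins, List.mem_cons, List.mem_nil_iff, or_false] at hw
        exact hw
      rcases hwhere sp hsp with hb | hcw | rfl | rfl
      · unfold bookWins at hb
        simp only [List.mem_cons, List.not_mem_nil, or_false] at hb
        rcases hb with rfl | rfl | rfl | rfl | rfl <;> rcases hw' with rfl | rfl <;> simp only [] <;> omega
      · obtain ⟨_, h2, _, _⟩ := hcw.carry_apart hent hc (by decide : 252 ≤ 848)
        rcases hw' with rfl | rfl <;> simp only [] <;> omega
      · unfold G.ci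
        rcases hw' with rfl | rfl <;> simp only [] <;> omega
      · unfold G.pi
        rcases hw' with rfl | rfl <;> simp only [] <;> omega
  have hmu : mu m g.f ≤ mu g.e.mem g.f := by
    have h1 := hrp.mu_le
    rw [hmem] at h1
    exact Nat.le_trans h1 hc.mu_le
  have hshadow : ShadowInv g.others' g.frames' (g.RA - 248) m := by
    apply hc.shadow.untouched
    rw [← hmem]
    exact hun
  have hc' : Common u₀ g { v with mem := m } := by
    apply Common.of_frame (v := { v with mem := m }) hent hc.rbp hc.rsp code hc.inv
    · exact (congrArg UInt64.ofNat (hk 8 8 (by omega) (by omega) (by omega) (by omega))).trans hc.s_rbp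
    · exact (congrArg UInt64.ofNat (hk 16 8 (by omega) (by omega) (by omega) (by omega))).trans hc.s_r15
    · exact (congrArg UInt64.ofNat (hk 24 8 (by omega) (by omega) (by omega) (by omega))).trans hc.s_r14
    · exact (congrArg UInt64.ofNat (hk 32 8 (by omega) (by omega) (by omega) (by omega))).trans hc.s_r13
    · exact (congrArg UInt64.ofNat (hk 40 8 (by omega) (by omega) (by omega) (by omega))).trans hc.s_r12
    · exact (congrArg UInt64.ofNat (hk 48 8 (by omega) (by omega) (by omega) (by omega))).trans hc.s_rbx
    · exact (congrArg UInt64.ofNat (hk 184 8 (by omega) (by omega) (by omega) (by omega))).trans hc.fr_f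
    · exact (congrArg UInt64.ofNat (hk 216 8 (by omega) (by omega) (by omega) (by omega))).trans hc.fr_rb
    · exact (hk 156 4 (by omega) (by omega) (by omega) (by omega)).trans hc.fr_ch
    · exact (hk 196 4 (by omega) (by omega) (by omega) (by omega)).trans hc.fr_prd
    · exact (hk 200 4 (by omega) (by omega) (by omega) (by omega)).trans hc.fr_w
    · exact (hk 232 4 (by omega) (by omega) (by omega) (by omega)).trans hc.fr_rtype
    · exact (hk 176 8 (by omega) (by omega) (by omega) (by omega)).trans hc.fr_pcd
    · exact (hk 240 8 (by omega) (by omega) (by omega) (by omega)).trans hc.fr_si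
    · exact hsame
    · exact hshadow
    · exact hrp.bits
    · exact hbusy
    · exact htb'
    · exact hmu
  refine ⟨hc', ?_, ?_, ?_⟩
  · intro pass hp
    refine ⟨hp.rtype2, hp.ch_ge, hp.pass_le, ?_, ?_, ?_⟩
    · exact (hk 168 4 (by omega) (by omega) (by omega) (by omega)).trans hp.sl_pass
    · exact (hk 228 4 (by omega) (by omega) (by omega) (by omega)).trans hp.sl_tap
    · exact (hk 208 4 (by omega) (by omega) (by omega) (by omega)).trans hp.sl_n
  · intro j k hj hkk hfill
    have hres := hc.resAt hent
    have hrd : ResidueReads v.mem g.f m g.f g.r :=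
      ⟨hc'.reads.begin.trans hc.reads.begin.symm, hc'.reads.end_.trans hc.reads.end_.symm,
       hc'.reads.part_size.trans hc.reads.part_size.symm, hc'.reads.classifications.trans hc.reads.classifications.symm,
       hc'.reads.classbook.trans hc.reads.classbook.symm, hc'.reads.classdata.trans hc.reads.classdata.symm,
       hc'.reads.residue_books.trans hc.reads.residue_books.symm, hc'.reads.codebook_count.trans hc.reads.codebook_count.symm,
       hc'.reads.cbk.trans hc.reads.cbk.symm, hc'.reads.E.trans hc.reads.E.symm, hc'.reads.W.trans hc.reads.W.symm⟩
    -- the `classdata` table: a block the configuration reads, kept by every store inside the contract's footprint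
    have hR : ConfigOK.Reads g.e.mem g.f ⟨Residue.classdata g.e.mem g.r, 8 * Residue.E g.e.mem g.f g.r⟩ :=
      ConfigOK.Reads.residue (ResidueOK.Owns.record g.rn hent.args.rn_lt _ ResidueAtOK.Owns.classdata)
    have k1 := StoreOK.reads_kept hent.vorbis.config hok hent.sep hc.same hent.footprint_storeOK _ hR
    have k2 := StoreOK.reads_kept hent.vorbis.config hok hent.sep hsame hent.footprint_storeOK _ hR
    have hcd : (Block.mk (Residue.classdata v.mem g.r) (8 * Residue.E v.mem g.f g.r)).Kept v.mem m := by
      rw [hc.reads.classdata, hc.reads.E]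
      exact ⟨(Mem.EqOn.symm k1.same).trans k2.same, k1.inside⟩
    exact hfill.frame hj hkk hc.tb.size hTBk hrd hcd
  · exact hk 224 4 (by omega) (by omega) (by omega) (by omega)

/-- The image's text is not touched by stores into the own stack frame. -/
theorem code_stack {u₀ : State} {g : G} {m m' : Mem} (hent : Entered u₀ g) (hcode : CodeOK u₀ m)
    (hs : Mem.SameExcept (stackWins g) m m') : CodeOK u₀ m' := by
  have hroom := hent.room.1
  have eRA : g.RA = (g.e.reg .rsp).toNat := rfl
  refine Mem.EqOn.trans hcode (hs.eqOn _ _ ?_)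
  intro w hw
  have h := stackWins_in w hw
  left
  show L.textHi ≤ w.lo
  have e : L.textHi = 1154368 := rfl
  omega

/-- **The assertion at `cut13` = 0x10f193**, the return address of the call of codebook_decode_deinterleave_repeat: the stack
pointer is still below the two pushed arguments; COMMON and path A hold for the memory (`common`: a state with this memory and
the steady stack pointer); the loop invariant of the i-loop 2183 for `i`, `pcount`; the callee's result in eax, with CI again on a
result 1 (`DeintPost.one`). -/
structure Ret13 (u₀ : State) (g : G) (pass cs i pcount : Nat) (v : State) : Prop where
  /-- at `cut13` -/
  rip : v.rip = L.decode_residue.cut13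
  /-- the two pushed arguments are still on the stack -/
  rsp : v.reg .rsp = g.e.reg .rsp - 264
  /-- the frame pointer -/
  rbp : v.reg .rbp = g.e.reg .rsp - 8
  /-- DF = 0, the SSE exceptions masked -/
  inv : abiInv v
  /-- the image's text -/
  code : CodeOK u₀ v.mem
  /-- COMMON and path A for this memory -/
  common : ∃ w : State, w.mem = v.mem ∧ Common u₀ g w ∧ PathA g pass w
  /-- the variant `ch = 2` -/
  ch2 : g.ch = 2
  /-- `r14 = r` -/
  r14 : v.reg .r14 = UInt64.ofNat g.r
  /-- `r13d = i` -/
  r13 : v.reg .r13 = UInt64.ofNat i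
  /-- `r15d = pcount` -/
  r15 : v.reg .r15 = UInt64.ofNat pcount
  /-- `i < classwords` -/
  i_lt : i < g.W
  /-- `pcount < part_read` -/
  pc_lt : pcount < g.PRD
  /-- `[rbp−0xd8] = class_set` -/
  sl_cs : v.mem.readLE (g.e.reg .rsp - 224) 4 = cs
  /-- the invariant of the i-loop -/
  wi : WInnerInv v.mem g.f g.r g.TB g.C g.PRD g.W g.rowsA pass cs i pcount
  /-- the callee's result: 0, or 1 with CI on the two ints -/
  res : v.reg .rax = 0 ∨ (v.reg .rax = 1 ∧ InterAt v.mem g.ci g.pi g.ch g.n)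

/-- **From the entry of the call arm to the return of the call** (0x10f141 … 0x10f18e, then `cut13` = 0x10f193; C 2192, 2198):
`book = f->codebooks + b` (the check site 0x10f150: a field of `*f`), the two pushed arguments, the call of
codebook_decode_deinterleave_repeat with its whole precondition (`deint_pre`), and COMMON over the callee's footprint
(`common_deint`). -/
theorem call_walk {Lay : Layout} (hLay : Lay.hi = 0x1000000) {μ : Microarch} (hμ : UserX.MicroOK μ) {u₀ : State}
    (hcode : HasCodeNat Lay u₀ Vorbis.L.decode_residue.entry Vorbis.Code.code_decode_residue.nat Vorbis.L.decode_residue.size)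
    (h_load8 : Asan.SmallCheck Lay μ Vorbis.WayInv (Vorbis.CodeOK u₀) [.rax, .rcx, .rdx] 8 Vorbis.L.__asan_load8_noabort.entry)
    (h_deint : ∀ (others : List Obj) (frames : List (Nat × FrameLayout)) (Blk : Block → Prop) (len : Nat),
      Calls Lay μ Vorbis.WayInv (Vorbis.conv u₀) Vorbis.L.codebook_decode_deinterleave_repeat.entry
        (Vorbis.Spec.codebook_decode_deinterleave_repeat.spec others frames Blk len))
    {g : G} (hent : Entered u₀ g) (pass cs i pcount b : Nat) (v : State) (hb15 : b < 32768)
    (hat : AtB L.decode_residue.at_10f141 u₀ g pass cs i pcount b v) :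
    ReachVia Lay μ WayInv v (fun v' => Ret13 u₀ g pass cs i pcount v') := by
  obtain ⟨hloop, hi, hp, hslpsz, hslz, hrbx, hblt, hbook⟩ := hat
  obtain ⟨hrip, hc, hch2, hr14, hr13, hpath, hr15, hslcs, hwi, hinter⟩ := hloop
  have he := hent.entry
  v_entry he
  have hdeint := h_deint g.others' g.frames' g.Blk g.len
  have w_rip := hrip
  have b_rsp := hc.rsp
  have b_rbp := hc.rbp
  have b_rbx := hrbx
  have w_eq : Mem.EqOn Vorbis.L.textLo Vorbis.L.textHi u₀.mem v.mem := hc.code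
  have hdf : v.flags .df = false := (show abiInv _ from hc.inv).1
  have hmx : v.mxcsr &&& 0x1F80 = 0x1F80 := (show abiInv _ from hc.inv).2
  have hsse := Vorbis.sseOK_of_abiInv hc.inv
  have w_kept : RegsKept [.rsp] v v := RegsKept.refl _ _
  -- where `*f` is
  have hob : g.Blk (objBlock g.f) := hent.vorbis.obj
  have hobst := hent.pre.free.offStack _ hob
  have hobin := hent.pre.env.ok.inside _ hob
  simp only [vblock, voff] at hobst hobin
  have hrdi : g.e.reg .rdi = addr g.f := (eq_addr _ _ rfl)
  have l_f : UInt64.ofNat (v.mem.readLE (g.e.reg .rsp - 184) 8) = addr g.f := hc.fr_f.trans hrdi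
  obtain ⟨cbs, hcbs⟩ : ∃ cbs, stb_vorbis.codebooks v.mem g.f = cbs := ⟨_, rfl⟩
  have l_cbs : v.mem.readLE (addr g.f + 168) 8 = cbs := by
    rw [← hcbs]
    simp only [vfield, vacc, voff]
  have hfn : (addr g.f).toNat = g.f := toNat_addr _ (by omega)
  have l_psz := hslpsz
  have l_n := hpath.sl_n
  have l_ch := hc.fr_ch
  have l_rb := hc.fr_rb
  u_walk hcode [hμ.vendor] until [Vorbis.L.decode_residue.cut13] span [Vorbis.L.textLo, Vorbis.L.textHi] side (v_side)
  · -- 0x10f150: the check of `f->codebooks` (f + 168, 8 bytes): a field of `*f`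
    have hun : ShadowUntouched v.mem s_10f150.mem := by v_untouched
    have hL : BlkLive g.Blk g.Live' := hc.point.env.live
    have hs : Site g.Live' (g.f + 168) 8 := hc.point.vorbis.bits.site_field hL 168 8 (by omega) (by omega) rfl
    refine check_site hc.shadow hun hs ?_
    u_omega
  · -- the ABI invariant at the call
    v_inv
  · -- the precondition of codebook_decode_deinterleave_repeat
    show DeintPre g.others' g.frames' g.Blk g.len s_10f18e
    have hs : Mem.SameExcept (stackWins g) v.mem s_10f18e.mem := by
      unfold stackWins
      rw [w_mem]
      u_same
    have hun : ShadowUntouched v.mem s_10f18e.mem := by v_untouched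
    obtain ⟨hc1, _, _⟩ := common_stack (v' := { v with mem := s_10f18e.mem }) hent hc hs hun hc.rbp hc.rsp w_eq hc.inv
    have hinter' : InterAt s_10f18e.mem g.ci g.pi g.ch g.n := by
      apply hinter.frame
      · show sint32 (s_10f18e.mem.readLE (addr g.ci) 4) = sint32 (v.mem.readLE (addr g.ci) 4)
        rw [addr_ci hent]
        congr 1
        u_resolve
      · show sint32 (s_10f18e.mem.readLE (addr g.pi) 4) = sint32 (v.mem.readLE (addr g.pi) 4)
        rw [addr_pi hent]
        congr 1
        u_resolve
    have e_cc : stb_vorbis.codebook_count s_10f18e.mem g.f = stb_vorbis.codebook_count v.mem g.f :=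
      hc1.reads.codebook_count.trans hc.reads.codebook_count.symm
    have hbI : (b : Int) < stb_vorbis.codebook_count s_10f18e.mem g.f := by
      rw [e_cc]
      have e : sint16 b = (b : Int) := by
        unfold sint16
        rw [if_pos hb15]
      rw [e] at hbook
      omega
    have hcbs' : stb_vorbis.codebooks s_10f18e.mem g.f = cbs := by
      rw [← hcbs]
      simp only [vacc, voff]
      exact (hc1.obj.ptr 168 (by decide)).trans (hc.obj.ptr 168 (by decide)).symm
    have hv : Real.VorbisOK g.len g.Blk v.mem g.f := hc.point.vorbis
    have hF2 := hv.config.cb0.F2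
    have hF2in := hent.pre.env.ok.inside _ hF2
    rw [hcbs] at hF2in
    simp only [voff] at hF2in
    have ersi : (s_10f18e.reg .rsi).toNat = stb_vorbis.codebooks_at s_10f18e.mem g.f b := by
      unfold stb_vorbis.codebooks_at
      rw [hcbs', w_rsi, sext16_part b hb15]
      simp only [voff]
      show (addr b * 2120 + addr cbs).toNat = _
      rw [addr_mul_lit, addr_add_addr, toNat_addr _ (by omega)]
      omega
    obtain ⟨hn4096, _⟩ := n_prd_le hent
    have hpsz_lt : Residue.part_size g.e.mem g.r < 2 ^ 32 := Mem.u32_lt _ _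
    have hlen : s_10f18e.mem.u32 (g.RA - 264) = g.n := by
      have h8 : s_10f18e.mem.readLE (g.e.reg .rsp - 264) 8 = (BitVec.setWidth 64 (BitVec.ofNat 32 g.n)).toNat := by
        u_resolve
        exact Nat.mod_eq_of_lt (BitVec.isLt _)
      exact arg_slot hent 264 (by omega) (by omega) h8
    have htot : s_10f18e.mem.u32 (g.RA - 256) = Residue.part_size g.e.mem g.r := by
      have h8 : s_10f18e.mem.readLE (g.e.reg .rsp - 256) 8 =
          (BitVec.setWidth 64 (BitVec.ofNat 32 (Residue.part_size g.e.mem g.r))).toNat := by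
        u_resolve
        exact Nat.mod_eq_of_lt (BitVec.isLt _)
      exact arg_slot hent 256 (by omega) hpsz_lt h8
    have ercx : (s_10f18e.reg .rcx).toNat % 2 ^ 32 = g.ch := by
      rw [w_rcx, toNat_ofBV32, BitVec.toNat_ofNat, hch2]
    exact deint_pre hent hc hch2 hs hun w_eq hinter' w_rsp (w_rdi.trans hrdi.symm) w_rdx ercx w_r8 w_r9 b hbI ersi hlen htot
  · -- 0x10f193 (`cut13`): the callee has returned
    obtain ⟨hpost_un, hpost_rd, hpost_res, hpost_one, hpost_zero⟩ := w_post
    -- (the callee's footprint is hidden from the frame tactics: its list of windows is not a literal)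
    have hcall := PLift.up w_same
    clear w_same
    have w_mem := w_mem_10f18e
    have hs : Mem.SameExcept (stackWins g) v.mem s_10f18e.mem := by
      unfold stackWins
      rw [w_mem]
      u_same
    have hun : ShadowUntouched v.mem s_10f18e.mem := by v_untouched
    have hroom := hent.room.1
    have code1 : CodeOK u₀ s_10f18e.mem := code_stack hent hc.code hs
    obtain ⟨hc1, hpath1, hfill1⟩ :=
      common_stack (v' := { v with mem := s_10f18e.mem }) hent hc hs hun hc.rbp hc.rsp code1 hc.inv
    have ersp : (s_10f18e.reg .rsp).toNat = g.RA - 272 := by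
      rw [w_rsp_10f18e]
      exact rsp_sub hent 272 (by omega)
    have erdi : (s_10f18e.reg .rdi).toNat = g.f := by
      rw [w_rdi_10f18e]
      exact hfn
    have erdx : (s_10f18e.reg .rdx).toNat = g.rb := by
      rw [w_rdx_10f18e]
      rfl
    have ercx : argU32 (s_10f18e.reg .rcx) = g.ch := by
      show (s_10f18e.reg .rcx).toNat % 2 ^ 32 = g.ch
      rw [w_rcx_10f18e, toNat_ofBV32, BitVec.toNat_ofNat, hch2]
    have er8 : (s_10f18e.reg .r8).toNat = g.ci := by
      rw [w_r8_10f18e]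
      exact rsp_sub hent 104 (by omega)
    have er9 : (s_10f18e.reg .r9).toNat = g.pi := by
      rw [w_r9_10f18e]
      exact rsp_sub hent 88 (by omega)
    obtain ⟨hn4096, _⟩ := n_prd_le hent
    have hlen : s_10f18e.mem.u32 (g.RA - 264) = g.n := by
      have h8 : s_10f18e.mem.readLE (g.e.reg .rsp - 264) 8 = (BitVec.setWidth 64 (BitVec.ofNat 32 g.n)).toNat := by
        u_resolve
        exact Nat.mod_eq_of_lt (BitVec.isLt _)
      exact arg_slot hent 264 (by omega) (by omega) h8
    have w_eq := Vorbis.conv_code_eqOn w_code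
    rw [erdi] at hpost_rd
    obtain ⟨hcm, hpathm, hfillm, hcsm⟩ := common_deint (v := { v with mem := s_10f18e.mem }) (s := s_10f18e)
      (lo := (s_10f18e.reg .rsp).toNat - 496) (hi := (s_10f18e.reg .rsp).toNat) hent hc1 rfl ersp erdi erdx ercx er8 er9
      hlen (by omega) (by omega) (by omega) hcall.down hpost_un hpost_rd w_eq
    have hW := hc.w_pos hent
    have hC : 0 < g.C := by
      have := hent.args.ch_le
      unfold G.C
      omega
    have hwi' : WInnerInv s_10f18er.mem g.f g.r g.TB g.C g.PRD g.W g.rowsA pass cs i pcount := by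
      apply hwi.frame (fun j h => h) ?_ hW
      intro j k hj hf hk
      have e : j = 0 := hj
      exact hfillm j k (by omega) hk (hfill1 j k (by omega) hk hf)
    have hslcs1 : s_10f18e.mem.readLE (g.e.reg .rsp - 224) 4 = cs := by
      u_resolve
    have hcomm : ∃ w : State, w.mem = s_10f18er.mem ∧ Common u₀ g w ∧ PathA g pass w := by
      refine ⟨_, ?_, hcm, hpathm pass (hpath1 pass hpath)⟩
      rfl
    refine ReachVia.done ⟨w_rip, w_rsp, (w_kept .rbp rfl).trans b_rbp, w_inv, w_eq, hcomm, hch2, (w_kept .r14 rfl).trans hr14, (w_kept .r13 rfl).trans hr13,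
      (w_kept .r15 rfl).trans hr15, hi, hp, hcsm.trans hslcs1, hwi', ?_⟩
    rcases hpost_res with h0 | h1
    · exact Or.inl h0
    · refine Or.inr ⟨h1, ?_⟩
      have h := hpost_one h1
      have e8 : (s_10f18e.reg .rsp).toNat + 8 = g.RA - 264 := by omega
      rw [er8, er9, ercx, e8, hlen] at h
      exact h

/-- `add r13d, 1` on a small counter. -/
theorem cnt_incr32 (x : Nat) (hx : x + 1 < 2 ^ 32) :
    Word.ofBV (Word.part Width.w32 (UInt64.ofNat x) + 1#32) = UInt64.ofNat (x + 1) := by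
  apply UInt64.toNat_inj.mp
  rw [toNat_ofBV32, BitVec.toNat_add, Asan.part32_toNat, UInt64.toNat_ofNat', UInt64.toNat_ofNat']
  have e1 : (1#32).toNat = 1 := by decide
  rw [e1]
  omega

/-- **From the return of the call to the exits** (`cut13` = 0x10f193 … 0x10f1a3, 0x10f290 … 0x10f297; C 2198, 2183, 2204):
`add rsp, 0x10 ; test eax, eax`; result 1: the latch `++i, ++pcount` and the loop head `cut14` with CI again; result 0:
`mov r15d, [rbp−0xdc]` (`tap`) and `jmp done`. No store. -/
theorem ret_walk {Lay : Layout} (hLay : Lay.hi = 0x1000000) {μ : Microarch} (hμ : UserX.MicroOK μ) {u₀ : State}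
    (hcode : HasCodeNat Lay u₀ Vorbis.L.decode_residue.entry Vorbis.Code.code_decode_residue.nat Vorbis.L.decode_residue.size)
    {g : G} (hent : Entered u₀ g) (pass cs i pcount : Nat) (v : State) (hat : Ret13 u₀ g pass cs i pcount v) :
    ReachVia Lay μ WayInv v (fun v' => AtIn L.decode_residue.cut14 u₀ g pass cs (i + 1) (pcount + 1) v' ∨ At32 u₀ g v') := by
  obtain ⟨hrip, b_rsp, b_rbp, hinv, hcodeok, ⟨w, hwm, hcw, hpw⟩, hch2, hr14, hr13, hr15, hi, hp, hslcs, hwi, hres⟩ := hat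
  have he := hent.entry
  v_entry he
  have w_rip := hrip
  have b_r13 := hr13
  have b_r15 := hr15
  have w_eq : Mem.EqOn Vorbis.L.textLo Vorbis.L.textHi u₀.mem v.mem := hcodeok
  have hdf : v.flags .df = false := (show abiInv _ from hinv).1
  have hmx : v.mxcsr &&& 0x1F80 = 0x1F80 := (show abiInv _ from hinv).2
  have hsse := Vorbis.sseOK_of_abiInv hinv
  have w_kept : RegsKept [.rsp] v v := RegsKept.refl _ _
  have l_tap : v.mem.readLE (g.e.reg .rsp - 228) 4 = g.tap := by
    rw [← hwm]
    exact hpw.sl_tap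
  have htap32 : g.tap < 2 ^ 32 := by
    have h := hent.ado.ok.AR1
    unfold G.tap
    omega
  have hWlt := w_lt g
  obtain ⟨_, hprd8192⟩ := n_prd_le hent
  rcases hres with b_rax | ⟨b_rax, hinter⟩
  · -- result 0: `goto done`
    u_walk hcode [hμ.vendor] until [Vorbis.L.decode_residue.cut14, Vorbis.L.decode_residue.cut32]
      span [Vorbis.L.textLo, Vorbis.L.textHi] side (v_side)
    · -- 0x10fa53 (`cut32`, `done:`): `At32`, r15d = tap
      have hm : s_10f297.mem = w.mem := w_mem.trans hwm.symm
      have hc' : Common u₀ g s_10f297 := hcw.moved_to hm ((w_kept .rbp rfl).trans b_rbp) w_rsp (by v_inv)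
      refine ReachVia.done (Or.inr ⟨w_rip, hc', ?_⟩)
      rw [w_r15]
      apply UInt64.toNat_inj.mp
      rw [toNat_ofBV32, BitVec.toNat_ofNat, UInt64.toNat_ofNat']
      omega
    · -- the latch is not reached: eax = 0
      exfalso
      exact hbr_10f199 (by decide)
  · -- result 1: the latch
    u_walk hcode [hμ.vendor] until [Vorbis.L.decode_residue.cut14, Vorbis.L.decode_residue.cut32]
      span [Vorbis.L.textLo, Vorbis.L.textHi] side (v_side)
    · -- `goto done` is not taken: eax = 1
      exfalso
      exact absurd hbr_10f199 (by decide)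
    · -- 0x10f1a7 (`cut14`): the loop head with `i + 1`, `pcount + 1`
      have hm : s_10f1a3.mem = w.mem := w_mem.trans hwm.symm
      have hc' : Common u₀ g s_10f1a3 := hcw.moved_to hm ((w_kept .rbp rfl).trans b_rbp) w_rsp (by v_inv)
      have hpath' : PathA g pass s_10f1a3 := by
        refine ⟨hpw.rtype2, hpw.ch_ge, hpw.pass_le, ?_, ?_, ?_⟩
        · rw [hm]
          exact hpw.sl_pass
        · rw [hm]
          exact hpw.sl_tap
        · rw [hm]
          exact hpw.sl_n
      refine ReachVia.done (Or.inl ⟨w_rip, hc', hch2, (w_kept .r14 rfl).trans hr14, ?_, hpath', ?_, ?_, ?_, ?_⟩)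
      · rw [w_r13]
        exact cnt_incr32 i (by omega)
      · rw [w_r15]
        exact cnt_incr32 pcount (by omega)
      · rw [w_mem]
        exact hslcs
      · rw [w_mem]
        exact hwi.step hi hp
      · rw [w_mem]
        exact hinter

end Vorbis.Spec.decode_residue_4b
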